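-- pv_equiv track=rewrite | github.com/Rishabh4Jakhar/CO_Project_Group | Simulator.py | sext
-- ===== SOURCE A (Python) =====
-- def sext(imm):
--     if imm[0] == '0':
--         while len(imm)<32 :
--             imm = '0' + imm
--         return imm
--     while len(imm) < 32:
--         imm = '1' + imm
--     return imm
-- ===== SOURCE B (Python) =====
-- def sext(imm):
--     pad = '0' if imm[0] == '0' else '1'
--     return pad * (32 - len(imm)) + imm
-- ===== Notes on version B (the rewrite author's own statement) =====
-- stated objective: simpler
-- what changed: Replaces the branch on the sign bit with two one-char-at-a-time while loops by one closed-form expression: pick the pad character and prepend it (32 - len) times via string multiplication.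
import Mathlib
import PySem

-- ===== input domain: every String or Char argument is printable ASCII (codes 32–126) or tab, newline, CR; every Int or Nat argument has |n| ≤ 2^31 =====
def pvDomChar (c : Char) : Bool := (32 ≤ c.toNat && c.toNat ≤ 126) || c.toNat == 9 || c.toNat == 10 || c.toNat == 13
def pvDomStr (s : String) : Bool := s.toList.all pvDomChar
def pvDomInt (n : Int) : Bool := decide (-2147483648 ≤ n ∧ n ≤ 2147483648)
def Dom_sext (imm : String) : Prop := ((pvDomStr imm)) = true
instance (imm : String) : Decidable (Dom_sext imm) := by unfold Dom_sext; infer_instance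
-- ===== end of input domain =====

-- B replaces A's sign-bit branch with two prepend-one-char while loops by a single
-- closed-form expression (pad character replicated 32 - len times); objective: simpler.

-- ===== PORT A =====
-- the while loop 'while len(imm) < 32: imm = c + imm'
def sextLoop (c : Char) (imm : List Char) : List Char :=
  if imm.length < 32 then sextLoop c (c :: imm) else imm
  termination_by 32 - imm.length

def sext (imm : String) : String :=
  match PySem.Str.pyGet? imm 0 with
  | none => ""   -- imm[0] raises IndexError on the empty string; excluded by Pre_
  | some c =>
    if c = '0' then String.mk (sextLoop '0' imm.toList)
    else String.mk (sextLoop '1' imm.toList)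

-- ===== PORT B =====
def sext_alt (imm : String) : String :=
  match PySem.Str.pyGet? imm 0 with
  | none => ""   -- imm[0] raises IndexError on the empty string; excluded by Pre_
  | some c =>
    let pad : Char := if c = '0' then '0' else '1'
    String.mk (List.replicate ((32 - (imm.toList.length : Int)).toNat) pad ++ imm.toList)

-- ===== PRECONDITION & SPEC =====
-- A (and B) evaluate imm[0], which raises IndexError on the empty string.
def Pre_sext (imm : String) : Prop := imm ≠ ""
instance (imm : String) : Decidable (Pre_sext imm) := by unfold Pre_sext; infer_instance
def pvWitness_sext : String := "101"

def Spec_sext (imm : String) (out : String) : Prop := out = sext_alt imm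
instance (imm : String) (out : String) : Decidable (Spec_sext imm out) := by unfold Spec_sext; infer_instance

-- ===== CLAIM (what is proved, stated in full; the proofs are below) =====
def Claim_equal_sext : Prop := ∀ (imm : String), Dom_sext imm → Pre_sext imm → Spec_sext imm (sext imm)

-- ===== LEMMAS AND PROOFS =====
theorem sextLoop_eq (c : Char) (l : List Char) :
    sextLoop c l = List.replicate (32 - l.length) c ++ l := by
  generalize hk : 32 - l.length = k
  induction k generalizing l with
  | zero =>
    rw [sextLoop]
    simp only [if_neg (by omega : ¬ l.length < 32)]
    simp
  | succ k ih =>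
    rw [sextLoop]
    simp only [if_pos (by omega : l.length < 32)]
    rw [ih (c :: l) (by simp; omega)]
    rw [List.replicate_succ']
    simp

theorem sext_spec : Claim_equal_sext := by
  intro imm _ _
  unfold Spec_sext sext sext_alt
  cases h : PySem.Str.pyGet? imm 0 with
  | none => rfl
  | some c =>
    simp only []
    by_cases hc : c = '0' <;>
      simp [hc, sextLoop_eq]
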